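-- pv_equiv track=rewrite | github.com/harborsuits/BensPaperTradingBot | trading_bot_BACKUP_20250912/trade_journal.py | _find_max_consecutive
-- ===== SOURCE A (Python) =====
-- from typing import Dict, List, Any, Optional, Tuple, Union
--
-- def _find_max_consecutive(results: List[str], target_result: str) -> int:
--     """
--     Find maximum consecutive occurrences of a result.
--
--     Args:
--         results: List of trade results
--         target_result: Result to look for
--
--     Returns:
--         Maximum consecutive occurrences
--     """
--     max_consecutive = 0
--     current_consecutive = 0
--
--     for result in results:
--         if result == target_result:
--             current_consecutive += 1
--             max_consecutive = max(max_consecutive, current_consecutive)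
--         else:
--             current_consecutive = 0
--
--     return max_consecutive
-- ===== SOURCE B (Python) =====
-- from itertools import groupby
-- from typing import List
--
--
-- def _find_max_consecutive(results: List[str], target_result: str) -> int:
--     """Max consecutive occurrences of target_result, via maximal-run grouping."""
--     return max(
--         (sum(1 for _ in group) for key, group in groupby(results) if key == target_result),
--         default=0,
--     )
-- ===== Notes on version B (the rewrite author's own statement) =====
-- stated objective: idiomatic
-- what changed: Replaces the running-counter-with-reset loop by itertools.groupby: partition the list into maximal runs of equal values and take the max length among runs equal to the target (default 0).
import Mathlib
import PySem

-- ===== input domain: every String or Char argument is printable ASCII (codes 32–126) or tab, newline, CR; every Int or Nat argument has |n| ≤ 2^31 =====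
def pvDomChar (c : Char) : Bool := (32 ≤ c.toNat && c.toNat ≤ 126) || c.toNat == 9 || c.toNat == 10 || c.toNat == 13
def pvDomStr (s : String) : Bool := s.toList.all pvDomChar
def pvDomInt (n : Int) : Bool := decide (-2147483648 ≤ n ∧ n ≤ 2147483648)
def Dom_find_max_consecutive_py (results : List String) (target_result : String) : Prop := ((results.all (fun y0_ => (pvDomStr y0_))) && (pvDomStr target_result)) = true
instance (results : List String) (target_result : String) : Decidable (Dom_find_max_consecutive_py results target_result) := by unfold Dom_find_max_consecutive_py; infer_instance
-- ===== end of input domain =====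

-- B replaces A's running-counter-with-reset loop by grouping the list into maximal runs
-- of equal values and taking the max length among runs of the target (idiomatic groupby).

-- ===== PORT A =====
-- running (max_consecutive, current_consecutive) state, one fold over results
def find_max_consecutive_py (results : List String) (target_result : String) : Int :=
  (results.foldl
    (fun (st : Int × Int) result =>
      if result == target_result then (max st.1 (st.2 + 1), st.2 + 1)
      else (st.1, 0))
    (0, 0)).1

-- ===== PORT B =====
-- itertools.groupby: maximal runs of equal consecutive values, as (key, run-length) pairs
def pyGroupRuns (l : List String) : List (String × Int) :=
  match l with
  | [] => []
  | x :: xs =>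
      (x, 1 + ((xs.takeWhile (fun y => y == x)).length : Int))
        :: pyGroupRuns (xs.dropWhile (fun y => y == x))
termination_by l.length
decreasing_by
  simpa using Nat.lt_succ_of_le (List.Sublist.length_le (List.dropWhile_sublist _))

-- max over the run lengths whose key equals the target, default 0
def find_max_consecutive_py_alt (results : List String) (target_result : String) : Int :=
  (pyGroupRuns results).foldl
    (fun acc p => if p.1 == target_result then max acc p.2 else acc) 0

-- ===== PRECONDITION & SPEC =====
def Spec_find_max_consecutive_py (results : List String) (target_result : String) (out : Int) : Prop := out = find_max_consecutive_py_alt results target_result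
instance (results : List String) (target_result : String) (out : Int) : Decidable (Spec_find_max_consecutive_py results target_result out) := by unfold Spec_find_max_consecutive_py; infer_instance

-- ===== CLAIM (what is proved, stated in full; the proofs are below) =====
def Claim_equal_find_max_consecutive_py : Prop := ∀ (results : List String) (target_result : String), Dom_find_max_consecutive_py results target_result → Spec_find_max_consecutive_py results target_result (find_max_consecutive_py results target_result)

-- ===== LEMMAS AND PROOFS =====

-- A's loop step / B's reduction step, abbreviated for the lemmas
def stepA (t : String) (st : Int × Int) (r : String) : Int × Int :=
  if r == t then (max st.1 (st.2 + 1), st.2 + 1) else (st.1, 0)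

def stepB (t : String) (acc : Int) (p : String × Int) : Int :=
  if p.1 == t then max acc p.2 else acc

-- pulling a `max` out of B's fold
lemma foldB_max (t : String) (rs : List (String × Int)) :
    ∀ a b : Int, rs.foldl (stepB t) (max a b) = max a (rs.foldl (stepB t) b) := by
  induction rs with
  | nil => intro a b; simp
  | cons p rest ih =>
      intro a b
      simp only [List.foldl_cons, stepB]
      by_cases h : p.1 == t
      · simp [h, max_assoc, ih]
      · simp [h, ih]

lemma foldB_nonneg (t : String) (rs : List (String × Int)) :
    ∀ a : Int, 0 ≤ a → 0 ≤ rs.foldl (stepB t) a := by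
  induction rs with
  | nil => intro a ha; simpa using ha
  | cons p rest ih =>
      intro a ha
      simp only [List.foldl_cons, stepB]
      by_cases h : (p.1 == t) = true
      · rw [if_pos h]; exact ih _ (le_max_of_le_left ha)
      · rw [if_neg h]; exact ih _ ha

-- A's fold over a block of elements all equal to the target
lemma foldA_all_target (t : String) (u : List String) (hu : ∀ y ∈ u, y = t) :
    ∀ m c : Int, c ≤ m →
      u.foldl (stepA t) (m, c) = (max m (c + u.length), c + u.length) := by
  induction u with
  | nil => intro m c hcm; simp [max_eq_left hcm]
  | cons y u' ih =>
      intro m c hcm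
      have hy : y = t := hu y (by simp)
      simp only [List.foldl_cons, stepA, hy, BEq.rfl, if_true]
      rw [ih (fun z hz => hu z (by simp [hz])) _ _ (le_max_right _ _)]
      have hlen : ((y :: u').length : Int) = (u'.length : Int) + 1 := by
        push_cast [List.length_cons]; ring
      have h0 : (0:Int) ≤ (u'.length : Int) := Int.natCast_nonneg _
      refine Prod.ext ?_ ?_
      · show max (max m (c + 1)) (c + 1 + (u'.length : Int)) = max m (c + ((y :: u').length : Int))
        rw [hlen, max_assoc, max_eq_right (by omega : (c+1:Int) ≤ c + 1 + (u'.length : Int))]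
        congr 1; ring
      · show c + 1 + (u'.length : Int) = c + ((y :: u').length : Int)
        rw [hlen]; ring

-- A's fold over a block of elements all different from the target
lemma foldA_no_target (t : String) (u : List String) (hu : ∀ y ∈ u, y ≠ t) :
    ∀ m c : Int, u.foldl (stepA t) (m, c) = (m, if u.isEmpty then c else 0) := by
  induction u with
  | nil => intro m c; simp
  | cons y u' ih =>
      intro m c
      have hy : (y == t) = false := by
        simp [hu y (by simp)]
      simp only [List.foldl_cons, stepA, hy]
      rw [ih (fun z hz => hu z (by simp [hz]))]
      cases u' <;> simp

-- resetting the counter is harmless when the next element is not the target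
lemma foldA_head_not_target (t : String) (z : String) (d' : List String) (hz : z ≠ t) :
    ∀ m c : Int, (z :: d').foldl (stepA t) (m, c) = (z :: d').foldl (stepA t) (m, 0) := by
  intro m c
  have hzt : (z == t) = false := by simp [hz]
  simp [stepA, hzt]

-- main correspondence, by strong induction on the list length
lemma foldA_eq_foldB (t : String) :
    ∀ k : ℕ, ∀ l : List String, l.length ≤ k → ∀ m : Int, 0 ≤ m →
      (l.foldl (stepA t) (m, 0)).1 = max m ((pyGroupRuns l).foldl (stepB t) 0) := by
  intro k
  induction k with
  | zero =>
      intro l hl m hm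
      have : l = [] := List.eq_nil_of_length_eq_zero (Nat.le_zero.mp hl)
      subst this
      simp [pyGroupRuns, max_eq_left hm]
  | succ k ih =>
      intro l hl m hm
      cases l with
      | nil => simp [pyGroupRuns, max_eq_left hm]
      | cons x xs =>
          set tw := xs.takeWhile (fun y => y == x) with htw
          set dw := xs.dropWhile (fun y => y == x) with hdw
          have hsplit : xs = tw ++ dw := (List.takeWhile_append_dropWhile).symm
          have htw_eq : ∀ y ∈ tw, y = x := by
            intro y hy
            have := List.mem_takeWhile_imp hy
            simpa using this
          have hdlen : dw.length ≤ k := by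
            have h1 : dw.length ≤ xs.length := List.Sublist.length_le (List.dropWhile_sublist _)
            have h2 : xs.length ≤ k := Nat.lt_succ_iff.mp (by simpa using hl)
            omega
          have hruns : pyGroupRuns (x :: xs) =
              (x, 1 + (tw.length : Int)) :: pyGroupRuns dw := by
            rw [pyGroupRuns]
          have hlist : x :: xs = (x :: tw) ++ dw := by rw [hsplit]; rfl
          have hd_head : ∀ z d', dw = z :: d' → z ≠ x := by
            intro z d' hzd
            have := List.head?_dropWhile_not (fun y => y == x) xs
            rw [← hdw, hzd] at this
            simpa using this
          by_cases hxt : x = t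
          · -- leading run is the target
            have hall : ∀ y ∈ x :: tw, y = t := by
              intro y hy
              rcases List.mem_cons.mp hy with h | h
              · rw [h, hxt]
              · rw [htw_eq y h, hxt]
            have hA1 : (x :: tw).foldl (stepA t) (m, 0)
                = (max m (0 + ((x :: tw).length : Int)), 0 + ((x :: tw).length : Int)) :=
              foldA_all_target t _ hall m 0 hm
            have hn : ((x :: tw).length : Int) = 1 + (tw.length : Int) := by
              simp; ring
            rw [hruns, hlist, List.foldl_append, hA1]
            have hrun : (0 : Int) + (x :: tw).length = 1 + (tw.length : Int) := by
              rw [hn]; ring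
            rw [hrun]
            set n : Int := 1 + (tw.length : Int) with hnd
            have hn1 : (1:Int) ≤ n := by
              have : (0:Int) ≤ tw.length := Int.natCast_nonneg _
              omega
            have hA2 : (dw.foldl (stepA t) (max m n, n)).1
                = max (max m n) ((pyGroupRuns dw).foldl (stepB t) 0) := by
              cases hdwc : dw with
              | nil => simp [pyGroupRuns, max_eq_left (le_max_of_le_right (by omega) : (0:Int) ≤ max m n)]
              | cons z d' =>
                  have hz : z ≠ t := by
                    rw [← hxt]; exact hd_head z d' hdwc
                  rw [foldA_head_not_target t z d' hz]
                  rw [← hdwc]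
                  exact ih dw hdlen (max m n) (le_max_of_le_left hm)
            rw [hA2]
            simp only [List.foldl_cons, stepB]
            have hxtb : (x == t) = true := by simp [hxt]
            rw [if_pos hxtb]
            have : (max (0:Int) n) = max n 0 := max_comm _ _
            rw [this, foldB_max, max_assoc]
          · -- leading run is not the target
            have hnone : ∀ y ∈ x :: tw, y ≠ t := by
              intro y hy
              rcases List.mem_cons.mp hy with h | h
              · rw [h]; exact hxt
              · rw [htw_eq y h]; exact hxt
            have hA1 : (x :: tw).foldl (stepA t) (m, 0) = (m, 0) := by
              rw [foldA_no_target t _ hnone m 0]; simp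
            rw [hruns, hlist, List.foldl_append, hA1]
            simp only [List.foldl_cons, stepB]
            have hxtb : (x == t) = false := by simp [hxt]
            rw [if_neg (by simp [hxtb])]
            exact ih dw hdlen m hm

-- ===== VERDICT (by name: the statement is the Claim_ definition above) =====
theorem find_max_consecutive_py_spec : Claim_equal_find_max_consecutive_py := by
  intro results target_result _
  have h := foldA_eq_foldB target_result results.length results (le_refl _) 0 (le_refl _)
  show (results.foldl (stepA target_result) ((0:Int), (0:Int))).1
      = (pyGroupRuns results).foldl (stepB target_result) 0
  rw [h]
  exact max_eq_right (foldB_nonneg _ _ 0 (le_refl _))
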